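-- pv_equiv track=rewrite | github.com/TimoMorris/advent-of-code-2024 | src/day_04.py | get_diagonal_indices_nw_se_explicit
-- ===== SOURCE A (Python) =====
-- def get_diagonal_indices_nw_se_explicit(line_difference, length, height):
--     largest = max(length, height)
--     for i in range(0, largest):
--         row = i
--         column = line_difference + i
--         if not 0 <= row < height or not 0 <= column < length:
--             continue
--         yield row, column
-- ===== SOURCE B (Python) =====
-- def get_diagonal_indices_nw_se_explicit(line_difference, length, height):
--     # Closed-form bounds: valid rows i satisfy 0 <= i < height and 0 <= line_difference + i < length
--     lo = max(0, -line_difference)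
--     hi = min(height, length - line_difference)
--     for i in range(lo, hi):
--         yield i, line_difference + i
-- ===== Notes on version B (the rewrite author's own statement) =====
-- stated objective: faster
-- what changed: Instead of scanning every i in range(max(length,height)) and testing each candidate, B computes the valid row interval in closed form (lo=max(0,-line_difference), hi=min(height,length-line_difference)) and yields only the valid indices.
import Mathlib
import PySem

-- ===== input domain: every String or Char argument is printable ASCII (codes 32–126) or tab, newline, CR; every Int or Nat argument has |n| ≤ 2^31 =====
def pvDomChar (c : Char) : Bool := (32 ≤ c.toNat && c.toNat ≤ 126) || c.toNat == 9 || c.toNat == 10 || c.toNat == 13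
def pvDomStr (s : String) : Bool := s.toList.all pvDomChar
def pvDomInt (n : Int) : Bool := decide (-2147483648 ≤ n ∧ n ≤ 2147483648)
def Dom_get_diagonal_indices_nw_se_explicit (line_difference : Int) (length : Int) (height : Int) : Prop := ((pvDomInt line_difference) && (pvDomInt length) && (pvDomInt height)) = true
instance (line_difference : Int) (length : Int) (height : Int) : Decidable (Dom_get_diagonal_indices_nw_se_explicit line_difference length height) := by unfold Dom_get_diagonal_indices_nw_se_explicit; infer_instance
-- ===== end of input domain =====

-- B computes the valid row interval in closed form instead of scanning range(max(length,height)) and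
-- filtering; objective: faster (O(valid count) vs O(max(length,height))). Both Pythons are generators;
-- the ports return the list of yielded pairs.

-- ===== PORT A =====
-- literal transliteration: for i in range(0, max(length, height)): row=i; column=ld+i;
--   if not 0 <= row < height or not 0 <= column < length: continue; yield row, column
def get_diagonal_indices_nw_se_explicit (line_difference : Int) (length : Int) (height : Int) : List (Int × Int) :=
  (PySem.List.pyRange 0 (max length height) 1).foldl
    (fun acc i =>
      let row := i
      let column := line_difference + i
      if ¬ (0 ≤ row ∧ row < height) ∨ ¬ (0 ≤ column ∧ column < length) then acc
      else acc ++ [(row, column)])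
    []

-- ===== PORT B =====
-- literal transliteration of Source B: lo = max(0, -ld); hi = min(height, length - ld);
--   for i in range(lo, hi): yield i, ld + i
def get_diagonal_indices_nw_se_explicit_alt (line_difference : Int) (length : Int) (height : Int) : List (Int × Int) :=
  let lo := max 0 (-line_difference)
  let hi := min height (length - line_difference)
  (PySem.List.pyRange lo hi 1).map (fun i => (i, line_difference + i))

-- ===== PRECONDITION & SPEC =====
def Spec_get_diagonal_indices_nw_se_explicit (line_difference : Int) (length : Int) (height : Int) (out : List (Int × Int)) : Prop := out = get_diagonal_indices_nw_se_explicit_alt line_difference length height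
instance (line_difference : Int) (length : Int) (height : Int) (out : List (Int × Int)) : Decidable (Spec_get_diagonal_indices_nw_se_explicit line_difference length height out) := by unfold Spec_get_diagonal_indices_nw_se_explicit; infer_instance

-- ===== CLAIM (what is proved, stated in full; the proofs are below) =====
def Claim_equal_get_diagonal_indices_nw_se_explicit : Prop := ∀ (line_difference : Int) (length : Int) (height : Int), Dom_get_diagonal_indices_nw_se_explicit line_difference length height → Spec_get_diagonal_indices_nw_se_explicit line_difference length height (get_diagonal_indices_nw_se_explicit line_difference length height)

-- ===== LEMMAS AND PROOFS =====

-- A's skip-branch, written positively as a Bool filter test.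
theorem pv_step_eq (ld len h : Int) :
    (fun (acc : List (Int × Int)) (i : Int) =>
      let row := i
      let column := ld + i
      if ¬ (0 ≤ row ∧ row < h) ∨ ¬ (0 ≤ column ∧ column < len) then acc
      else acc ++ [(row, column)]) =
    (fun acc i =>
      if decide (0 ≤ i ∧ i < h ∧ 0 ≤ ld + i ∧ ld + i < len) then acc ++ [(i, ld + i)] else acc) := by
  funext acc i
  simp only []
  split_ifs with h1 h2 h2 <;> first | rfl | (exfalso; simp at *; omega)

-- Two strictly increasing Int lists with the same members are equal.
theorem pv_eq_of_pairwise_lt_of_mem (l1 l2 : List Int)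
    (h1 : l1.Pairwise (· < ·)) (h2 : l2.Pairwise (· < ·))
    (h : ∀ x, x ∈ l1 ↔ x ∈ l2) : l1 = l2 := by
  have p : l1.Perm l2 :=
    (List.perm_ext_iff_of_nodup (h1.imp (fun hab => ne_of_lt hab))
      (h2.imp (fun hab => ne_of_lt hab))).mpr h
  exact p.eq_of_pairwise (fun a b _ _ hab hba => ((lt_asymm hab) hba).elim) h1 h2

-- Filtering the scan range by A's test leaves exactly B's closed-form range.
theorem pv_filter_range (ld len h : Int) :
    (PySem.List.pyRange 0 (max len h) 1).filter
        (fun i => decide (0 ≤ i ∧ i < h ∧ 0 ≤ ld + i ∧ ld + i < len)) =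
      PySem.List.pyRange (max 0 (-ld)) (min h (len - ld)) 1 := by
  apply pv_eq_of_pairwise_lt_of_mem
  · exact (PySem.List.pairwise_lt_pyRange_one 0 (max len h)).filter _
  · exact PySem.List.pairwise_lt_pyRange_one _ _
  · intro x
    simp only [List.mem_filter, PySem.List.mem_pyRange_one, decide_eq_true_eq]
    omega

theorem get_diagonal_indices_nw_se_explicit_eq (ld len h : Int) :
    get_diagonal_indices_nw_se_explicit ld len h =
      get_diagonal_indices_nw_se_explicit_alt ld len h := by
  unfold get_diagonal_indices_nw_se_explicit get_diagonal_indices_nw_se_explicit_alt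
  rw [pv_step_eq]
  rw [PySem.List.foldl_append_if]
  rw [pv_filter_range]
  simp

-- ===== VERDICT (by name: the statement is the Claim_ definition above) =====
theorem get_diagonal_indices_nw_se_explicit_spec : Claim_equal_get_diagonal_indices_nw_se_explicit := by
  intro ld len h _
  exact get_diagonal_indices_nw_se_explicit_eq ld len h
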